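-- pv_equiv track=rewrite | github.com/CVW-HMB/healthcare-entity-resolution | src/physician_resolution/canonicalization/merge.py | _select_specialty
-- ===== SOURCE A (Python) =====
-- def _select_specialty(specialties: list[tuple[str, int]]) -> str | None:
--     """Select specialty - prefer higher priority source, then most common."""
--     if not specialties:
--         return None
--
--     # Group by normalized specialty
--     normalized: dict[str, list[tuple[str, int]]] = {}
--     for spec, priority in specialties:
--         key = spec.upper().strip()
--         if key not in normalized:
--             normalized[key] = []
--         normalized[key].append((spec, priority))
--
--     # Find most common
--     most_common_key = max(normalized.keys(), key=lambda k: len(normalized[k]))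
--
--     # From most common, pick highest priority version
--     versions = normalized[most_common_key]
--     best = max(versions, key=lambda x: x[1])
--     return best[0]
-- ===== SOURCE B (Python) =====
-- def _select_specialty(specialties: list[tuple[str, int]]) -> str | None:
--     """One pass: per normalized key keep (count, best_spec, best_priority)."""
--     if not specialties:
--         return None
--
--     rec: dict[str, tuple[int, str, int]] = {}
--     for spec, priority in specialties:
--         key = spec.upper().strip()
--         r = rec.get(key)
--         if r is None:
--             rec[key] = (1, spec, priority)
--         else:
--             count, best_spec, best_priority = r
--             if priority > best_priority:
--                 rec[key] = (count + 1, spec, priority)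
--             else:
--                 rec[key] = (count + 1, best_spec, best_priority)
--
--     best_key = max(rec, key=lambda k: rec[k][0])
--     return rec[best_key][1]
-- ===== Notes on version B (the rewrite author's own statement) =====
-- stated objective: simpler
-- what changed: Instead of grouping all (spec, priority) pairs into per-key lists and then scanning the chosen group again with max, B keeps a single running (count, best_spec, best_priority) record per normalized key in one pass, so no per-key lists are built and no second max-scan over a group is needed.
import Mathlib
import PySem

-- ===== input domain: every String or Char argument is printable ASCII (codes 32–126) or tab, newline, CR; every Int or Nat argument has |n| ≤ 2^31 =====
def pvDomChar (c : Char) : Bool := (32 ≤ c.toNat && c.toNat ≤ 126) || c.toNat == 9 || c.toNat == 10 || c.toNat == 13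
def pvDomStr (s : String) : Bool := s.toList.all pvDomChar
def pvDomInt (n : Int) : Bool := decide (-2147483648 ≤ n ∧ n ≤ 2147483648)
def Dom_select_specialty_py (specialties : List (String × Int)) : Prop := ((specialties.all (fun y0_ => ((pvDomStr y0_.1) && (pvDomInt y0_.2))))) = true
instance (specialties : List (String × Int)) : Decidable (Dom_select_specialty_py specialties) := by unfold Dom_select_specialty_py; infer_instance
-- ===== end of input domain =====

-- B replaces A's group-into-lists-then-rescan strategy by a single pass keeping a
-- running (count, best_spec, best_priority) record per normalized key (objective: simpler).


-- ===== PORT A =====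
-- key = spec.upper().strip()
def normKey (s : String) : String := PySem.Str.strip (PySem.Str.upper s)

-- the body of A's grouping loop: ensure key, then append to normalized[key]
def stepA (d : PySem.Dict String (List (String × Int))) (sp : String × Int) :
    PySem.Dict String (List (String × Int)) :=
  let key := normKey sp.1
  let d1 := if d.contains key then d else d.insert key []
  d1.insert key (d1.getD key [] ++ [sp])

def select_specialty_py (specialties : List (String × Int)) : Option String :=
  if specialties = [] then none
  else
    let normalized := specialties.foldl stepA PySem.Dict.empty
    match PySem.List.max? normalized.keys
        (fun k => ((normalized.getD k []).length : Int)) with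
    | none => none   -- unreachable: keys nonempty since specialties ≠ []
    | some most_common_key =>
      let versions := normalized.getD most_common_key []
      match PySem.List.max? versions (fun x => x.2) with
      | none => none -- unreachable: versions nonempty
      | some best => some best.1

-- ===== PORT B =====
-- the body of B's single loop: update the running (count, best_spec, best_priority)
def stepB (d : PySem.Dict String (Int × String × Int)) (sp : String × Int) :
    PySem.Dict String (Int × String × Int) :=
  let key := normKey sp.1
  match d.get? key with
  | none => d.insert key (1, sp.1, sp.2)
  | some r =>
    if r.2.2 < sp.2 then d.insert key (r.1 + 1, sp.1, sp.2)
    else d.insert key (r.1 + 1, r.2.1, r.2.2)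

def select_specialty_py_alt (specialties : List (String × Int)) : Option String :=
  if specialties = [] then none
  else
    let recd := specialties.foldl stepB PySem.Dict.empty
    match PySem.List.max? recd.keys (fun k => (recd.getD k (0, "", 0)).1) with
    | none => none   -- unreachable: rec nonempty
    | some best_key => some (recd.getD best_key (0, "", 0)).2.1

-- ===== PRECONDITION & SPEC =====
def Spec_select_specialty_py (specialties : List (String × Int)) (out : Option String) : Prop := out = select_specialty_py_alt specialties
instance (specialties : List (String × Int)) (out : Option String) : Decidable (Spec_select_specialty_py specialties out) := by unfold Spec_select_specialty_py; infer_instance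

-- ===== CLAIM (what is proved, stated in full; the proofs are below) =====
def Claim_equal_select_specialty_py : Prop := ∀ (specialties : List (String × Int)), Dom_select_specialty_py specialties → Spec_select_specialty_py specialties (select_specialty_py specialties)

-- ===== LEMMAS AND PROOFS =====

-- B's record for a group list: (length, first max-priority element)
def bestOf (l : List (String × Int)) : String × Int :=
  match PySem.List.max? l (fun x => x.2) with
  | some b => (b.1, b.2)
  | none => ("", 0)

def entryF (l : List (String × Int)) : Int × String × Int := ((l.length : Int), bestOf l)

def DRel (dA : PySem.Dict String (List (String × Int)))
    (dB : PySem.Dict String (Int × String × Int)) : Prop :=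
  dB.items = dA.items.map (fun p => (p.1, entryF p.2)) ∧ ∀ p ∈ dA.items, p.2 ≠ []

theorem rel_get? {dA : PySem.Dict String (List (String × Int))}
    {dB : PySem.Dict String (Int × String × Int)} (h : DRel dA dB) (k : String) :
    dB.get? k = (dA.get? k).map entryF := by
  simp [PySem.Dict.get?, h.1, List.find?_map, Function.comp_def, Option.map_map]

theorem rel_keys {dA : PySem.Dict String (List (String × Int))}
    {dB : PySem.Dict String (Int × String × Int)} (h : DRel dA dB) :
    dB.keys = dA.keys := by
  simp [PySem.Dict.keys, h.1, List.map_map, Function.comp_def]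

theorem rel_contains {dA : PySem.Dict String (List (String × Int))}
    {dB : PySem.Dict String (Int × String × Int)} (h : DRel dA dB) (k : String) :
    dB.contains k = dA.contains k := by
  rw [PySem.Dict.contains_eq_isSome_get?, PySem.Dict.contains_eq_isSome_get?, rel_get? h]
  cases dA.get? k <;> rfl

theorem max?_snoc {α κ : Type} [LT κ] [DecidableLT κ] (l : List α) (x : α) (key : α → κ) :
    PySem.List.max? (l ++ [x]) key =
      match PySem.List.max? l key with
      | none => some x
      | some m => if key m < key x then some x else some m := by
  rw [PySem.List.max?, List.foldl_append]
  rfl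

theorem bestOf_snoc (l : List (String × Int)) (sp : String × Int) (b : String × Int)
    (h : PySem.List.max? l (fun x => x.2) = some b) :
    bestOf (l ++ [sp]) = if b.2 < sp.2 then (sp.1, sp.2) else (b.1, b.2) := by
  unfold bestOf
  rw [max?_snoc, h]
  by_cases hlt : b.2 < sp.2
  · simp [hlt]
  · simp [hlt]

theorem rel_step {dA : PySem.Dict String (List (String × Int))}
    {dB : PySem.Dict String (Int × String × Int)} (h : DRel dA dB) (sp : String × Int) :
    DRel (stepA dA sp) (stepB dB sp) := by
  rcases hg : dA.get? (normKey sp.1) with _ | l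
  · -- fresh key
    have hc : dA.contains (normKey sp.1) = false := by
      rw [PySem.Dict.contains_eq_isSome_get?, hg]; rfl
    have hcB : dB.contains (normKey sp.1) = false := by rw [rel_contains h]; exact hc
    have hA : stepA dA sp = dA.insert (normKey sp.1) [sp] := by
      simp only [stepA, hc]
      simp [PySem.Dict.getD_insert_self, PySem.Dict.insert_insert_self]
    have hB : stepB dB sp = dB.insert (normKey sp.1) (1, sp.1, sp.2) := by
      simp only [stepB, rel_get? h, hg, Option.map_none]
    rw [hA, hB]
    constructor
    · rw [PySem.Dict.items_insert, PySem.Dict.items_insert, hc, hcB]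
      simp [entryF, bestOf, PySem.List.max?, h.1]
    · intro p hp
      rw [PySem.Dict.items_insert, hc] at hp
      simp only [Bool.false_eq_true, if_false, List.mem_append, List.mem_singleton] at hp
      rcases hp with hp | hp
      · exact h.2 p hp
      · subst hp; simp
  · -- existing key
    have hlne : l ≠ [] := h.2 _ (PySem.Dict.mem_items_of_get?_eq_some dA hg)
    have hc : dA.contains (normKey sp.1) = true := by
      rw [PySem.Dict.contains_eq_isSome_get?, hg]; rfl
    have hcB : dB.contains (normKey sp.1) = true := by rw [rel_contains h]; exact hc
    obtain ⟨b, hb⟩ : ∃ b, PySem.List.max? l (fun x => x.2) = some b := by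
      rcases hmb : PySem.List.max? l (fun x => x.2) with _ | b
      · exact absurd ((PySem.List.max?_eq_none_iff _ _).1 hmb) hlne
      · exact ⟨b, rfl⟩
    have hgetD : dA.getD (normKey sp.1) [] = l := by
      rw [PySem.Dict.getD_eq_get?_getD, hg]; rfl
    have hA : stepA dA sp = dA.insert (normKey sp.1) (l ++ [sp]) := by
      simp only [stepA, hc]
      simp [hgetD]
    have hB : stepB dB sp = dB.insert (normKey sp.1) (entryF (l ++ [sp])) := by
      simp only [stepB, rel_get? h, hg, Option.map_some]
      have hE : entryF l = ((l.length : Int), b.1, b.2) := by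
        simp [entryF, bestOf, hb]
      rw [hE]
      have hlen : ((l ++ [sp]).length : Int) = (l.length : Int) + 1 := by simp
      by_cases hlt : b.2 < sp.2
      · rw [if_pos hlt]
        congr 1
        simp [entryF, bestOf_snoc l sp b hb, hlt]
      · rw [if_neg hlt]
        congr 1
        simp [entryF, bestOf_snoc l sp b hb, hlt]
    rw [hA, hB]
    constructor
    · rw [PySem.Dict.items_insert, PySem.Dict.items_insert, hc, hcB, if_pos rfl, if_pos rfl,
        h.1, List.map_map, List.map_map]
      apply List.map_congr_left
      intro p _
      by_cases hpk : p.1 = normKey sp.1 <;> simp [hpk]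
    · intro p hp
      rw [PySem.Dict.items_insert, hc, if_pos rfl] at hp
      obtain ⟨q, hq, hqe⟩ := List.mem_map.1 hp
      by_cases hpk : (q.1 == normKey sp.1) = true
      · rw [if_pos hpk] at hqe; subst hqe; simp
      · rw [if_neg hpk] at hqe; subst hqe; exact h.2 q hq

theorem rel_fold (l : List (String × Int)) :
    ∀ dA dB, DRel dA dB → DRel (l.foldl stepA dA) (l.foldl stepB dB) := by
  induction l with
  | nil => intro dA dB h; exact h
  | cons x t ih => intro dA dB h; exact ih _ _ (rel_step h x)

theorem rel_empty : DRel PySem.Dict.empty PySem.Dict.empty := by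
  constructor <;> simp [PySem.Dict.empty]

theorem stepA_contains_mono (d : PySem.Dict String (List (String × Int)))
    (sp : String × Int) (k : String) (h : d.contains k = true) :
    (stepA d sp).contains k = true := by
  simp only [stepA]
  split_ifs with hc <;> simp [PySem.Dict.contains_insert, h]

theorem foldA_contains (l : List (String × Int)) :
    ∀ d k, d.contains k = true → (l.foldl stepA d).contains k = true := by
  induction l with
  | nil => intro d k h; exact h
  | cons x t ih => intro d k h; exact ih _ _ (stepA_contains_mono d x k h)

theorem stepA_contains_self (d : PySem.Dict String (List (String × Int)))
    (sp : String × Int) : (stepA d sp).contains (normKey sp.1) = true := by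
  simp only [stepA]
  split_ifs <;> simp

theorem max?_congr_aux {α : Type} (f g : α → Int) :
    ∀ (xs : List α) (acc : Option α), (∀ a ∈ xs, f a = g a) → (∀ m, acc = some m → f m = g m) →
    xs.foldl (fun acc x => match acc with
      | none => some x
      | some m => if f m < f x then some x else some m) acc =
    xs.foldl (fun acc x => match acc with
      | none => some x
      | some m => if g m < g x then some x else some m) acc := by
  intro xs
  induction xs with
  | nil => intro acc _ _; rfl
  | cons x t ih =>
    intro acc hmem hacc
    have hx : f x = g x := hmem x List.mem_cons_self
    have htail : ∀ a ∈ t, f a = g a := fun a ha => hmem a (List.mem_cons_of_mem _ ha)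
    cases acc with
    | none =>
      simp only [List.foldl_cons]
      exact ih (some x) htail (by intro m hm; cases hm; exact hx)
    | some m =>
      have hfm : f m = g m := hacc m rfl
      simp only [List.foldl_cons]
      show List.foldl (fun acc x => match acc with
          | none => some x
          | some m => if f m < f x then some x else some m)
          (if f m < f x then some x else some m) t =
        List.foldl (fun acc x => match acc with
          | none => some x
          | some m => if g m < g x then some x else some m)
          (if g m < g x then some x else some m) t
      rw [hfm, hx]
      apply ih _ htail
      intro m' hm'
      split_ifs at hm' <;> cases hm'
      · exact hx
      · exact hfm

theorem max?_congr {α : Type} (xs : List α) (f g : α → Int)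
    (h : ∀ a ∈ xs, f a = g a) :
    PySem.List.max? xs f = PySem.List.max? xs g := by
  unfold PySem.List.max?
  exact max?_congr_aux f g xs none h (by intro m hm; cases hm)

-- ===== VERDICT (by name: the statement is the Claim_ definition above) =====
set_option maxHeartbeats 1000000 in
theorem select_specialty_py_spec : Claim_equal_select_specialty_py := by
  intro specialties _
  unfold Spec_select_specialty_py
  cases specialties with
  | nil => rfl
  | cons x rest =>
    simp only [select_specialty_py, select_specialty_py_alt]
    rw [if_neg (List.cons_ne_nil x rest), if_neg (List.cons_ne_nil x rest)]
    have hrel : DRel ((x :: rest).foldl stepA PySem.Dict.empty)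
        ((x :: rest).foldl stepB PySem.Dict.empty) := rel_fold _ _ _ rel_empty
    set dA := (x :: rest).foldl stepA PySem.Dict.empty with hdA
    set dB := (x :: rest).foldl stepB PySem.Dict.empty with hdB
    have hcong : ∀ k ∈ dA.keys, (dB.getD k (0, "", 0)).1 = ((dA.getD k []).length : Int) := by
      intro k hk
      have hc : dA.contains k = true := (PySem.Dict.contains_iff_mem_keys dA k).2 hk
      rw [PySem.Dict.contains_eq_isSome_get?] at hc
      rcases hg : dA.get? k with _ | l
      · rw [hg] at hc; cases hc
      · rw [PySem.Dict.getD_eq_get?_getD, PySem.Dict.getD_eq_get?_getD, rel_get? hrel, hg]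
        rfl
    have hmax : PySem.List.max? dB.keys (fun k => (dB.getD k (0, "", 0)).1) =
        PySem.List.max? dA.keys (fun k => ((dA.getD k []).length : Int)) := by
      rw [rel_keys hrel]
      exact max?_congr _ _ _ hcong
    rcases hm : PySem.List.max? dA.keys (fun k => ((dA.getD k []).length : Int)) with _ | k
    · -- impossible: dA contains the first key
      exfalso
      have hck : dA.contains (normKey x.1) = true := by
        rw [hdA, List.foldl_cons]
        exact foldA_contains rest (stepA PySem.Dict.empty x) (normKey x.1)
          (stepA_contains_self PySem.Dict.empty x)
      have : dA.keys = [] := (PySem.List.max?_eq_none_iff _ _).1 hm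
      have := (PySem.Dict.contains_iff_mem_keys dA (normKey x.1)).1 hck
      rw [‹dA.keys = []›] at this
      cases this
    · rw [hmax, hm]
      have hk : k ∈ dA.keys := by
        have := PySem.List.max?_mem hm
        exact List.mem_map.2 ⟨_, List.mem_map.1 this |>.choose_spec.1, by
          have h' := (List.mem_map.1 this).choose_spec.2; exact h'⟩
      have hc : dA.contains k = true := (PySem.Dict.contains_iff_mem_keys dA k).2 hk
      rw [PySem.Dict.contains_eq_isSome_get?] at hc
      rcases hg : dA.get? k with _ | l
      · rw [hg] at hc; cases hc
      · have hlne : l ≠ [] := hrel.2 _ (PySem.Dict.mem_items_of_get?_eq_some dA hg)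
        obtain ⟨b, hb⟩ : ∃ b, PySem.List.max? l (fun p => p.2) = some b := by
          rcases hmb : PySem.List.max? l (fun p => p.2) with _ | b
          · exact absurd ((PySem.List.max?_eq_none_iff _ _).1 hmb) hlne
          · exact ⟨b, rfl⟩
        have hgetDA : dA.getD k [] = l := by rw [PySem.Dict.getD_eq_get?_getD, hg]; rfl
        have hgetDB : dB.getD k (0, "", 0) = entryF l := by
          rw [PySem.Dict.getD_eq_get?_getD, rel_get? hrel, hg]; rfl
        simp [hgetDA, hgetDB, hb, entryF, bestOf]
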